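-- pv_equiv track=rewrite | github.com/TheTimelessPuppeteer/chi-saho-wei-2026-python | weeks/week-05/solutions/1114405013/solution_question_10057_easy.py | analyze_numbers
-- ===== SOURCE A (Python) =====
-- def analyze_numbers(values):
--     """回傳 (a, count, ways)。"""
--     values.sort()
--     n = len(values)
--
--     # 中位數區間的左右端點
--     low = values[(n - 1) // 2]
--     high = values[n // 2]
--
--     # 最小可行 A
--     a = low
--
--     # 原始資料中，落在最優區間 [low, high] 的數量
--     count = sum(1 for x in values if low <= x <= high)
--
--     # 可行 A 的整數個數
--     ways = high - low + 1
--
--     return a, count, ways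
-- ===== SOURCE B (Python) =====
-- def _bisect_left(a, x):
--     lo, hi = 0, len(a)
--     while lo < hi:
--         mid = (lo + hi) // 2
--         if a[mid] < x:
--             lo = mid + 1
--         else:
--             hi = mid
--     return lo
--
--
-- def _bisect_right(a, x):
--     lo, hi = 0, len(a)
--     while lo < hi:
--         mid = (lo + hi) // 2
--         if x < a[mid]:
--             hi = mid
--         else:
--             lo = mid + 1
--     return lo
--
--
-- def analyze_numbers(values):
--     """回傳 (a, count, ways)。"""
--     values.sort()
--     n = len(values)
--     low = values[(n - 1) // 2]
--     high = values[n // 2]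
--     # the list is sorted, so the elements in [low, high] form a contiguous
--     # block; count it with two binary searches instead of a full scan
--     count = _bisect_right(values, high) - _bisect_left(values, low)
--     return low, count, high - low + 1
-- ===== Notes on version B (the rewrite author's own statement) =====
-- stated objective: alternative
-- what changed: The linear scan counting elements in [low, high] is replaced by two hand-written binary searches on the already-sorted list (count = bisect_right(high) - bisect_left(low)), exploiting sortedness; the O(n log n) sort still dominates.
import Mathlib
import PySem

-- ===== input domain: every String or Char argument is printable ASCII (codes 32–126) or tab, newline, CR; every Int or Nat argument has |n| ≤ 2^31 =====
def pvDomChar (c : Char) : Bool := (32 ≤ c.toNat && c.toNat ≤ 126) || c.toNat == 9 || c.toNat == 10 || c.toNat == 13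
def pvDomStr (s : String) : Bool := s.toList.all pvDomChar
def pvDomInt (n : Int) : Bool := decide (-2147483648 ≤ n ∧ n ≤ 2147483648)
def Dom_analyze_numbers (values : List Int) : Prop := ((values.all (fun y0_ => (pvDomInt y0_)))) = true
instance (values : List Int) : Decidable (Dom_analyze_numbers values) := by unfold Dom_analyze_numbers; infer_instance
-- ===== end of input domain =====

-- B replaces A's linear scan counting the elements in [low, high] by two binary searches
-- on the already-sorted list (alternative algorithm; the sort still dominates the cost).
-- Both A and B sort `values` in place; the equivalence proved here is about the return value.

-- ===== PORT A =====
-- values.sort() sorts in place; the rest of A reads the sorted list, ported as `vs`.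
-- Pre_ (values ≠ []) keeps both median indices in range, so pyGetD is exact here.
def analyze_numbers (values : List Int) : Int × Int × Int :=
  let vs := PySem.List.sorted values (fun x => x)
  let n : Int := vs.length
  let low := PySem.List.pyGetD vs (PySem.Int.floordiv (n - 1) 2) 0
  let high := PySem.List.pyGetD vs (PySem.Int.floordiv n 2) 0
  let a := low
  let count := vs.foldl (fun acc x => if low ≤ x ∧ x ≤ high then acc + 1 else acc) (0 : Int)
  let ways := high - low + 1
  (a, count, ways)

-- ===== PORT B =====
-- hand-written binary search loops of Source B (`while lo < hi` with integer midpoint);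
-- mid is always in range on every call with hi ≤ len, so pyGetD is exact here.
def bisectLeftLoop (a : List Int) (x : Int) (lo hi : Nat) : Nat :=
  if _h : lo < hi then
    if PySem.List.pyGetD a (((lo + hi) / 2 : Nat) : Int) 0 < x then
      bisectLeftLoop a x ((lo + hi) / 2 + 1) hi
    else
      bisectLeftLoop a x lo ((lo + hi) / 2)
  else lo
termination_by hi - lo
decreasing_by all_goals omega

def bisectRightLoop (a : List Int) (x : Int) (lo hi : Nat) : Nat :=
  if _h : lo < hi then
    if x < PySem.List.pyGetD a (((lo + hi) / 2 : Nat) : Int) 0 then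
      bisectRightLoop a x lo ((lo + hi) / 2)
    else
      bisectRightLoop a x ((lo + hi) / 2 + 1) hi
  else lo
termination_by hi - lo
decreasing_by all_goals omega

def analyze_numbers_alt (values : List Int) : Int × Int × Int :=
  let vs := PySem.List.sorted values (fun x => x)
  let n : Int := vs.length
  let low := PySem.List.pyGetD vs (PySem.Int.floordiv (n - 1) 2) 0
  let high := PySem.List.pyGetD vs (PySem.Int.floordiv n 2) 0
  let count : Int := (bisectRightLoop vs high 0 vs.length : Int) - (bisectLeftLoop vs low 0 vs.length : Int)
  (low, count, high - low + 1)

-- ===== PRECONDITION & SPEC =====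
-- A raises IndexError on the empty list (values[(n-1)//2] with n = 0); B raises there too.
def Pre_analyze_numbers (values : List Int) : Prop := values ≠ []
instance (values : List Int) : Decidable (Pre_analyze_numbers values) := by
  unfold Pre_analyze_numbers; infer_instance

def pvWitness_analyze_numbers : List Int := [3, 1, 2, 2]

def Spec_analyze_numbers (values : List Int) (out : Int × Int × Int) : Prop := out = analyze_numbers_alt values
instance (values : List Int) (out : Int × Int × Int) : Decidable (Spec_analyze_numbers values out) := by unfold Spec_analyze_numbers; infer_instance

-- ===== CLAIM (what is proved, stated in full; the proofs are below) =====
def Claim_equal_analyze_numbers : Prop := ∀ (values : List Int), Dom_analyze_numbers values → Pre_analyze_numbers values → Spec_analyze_numbers values (analyze_numbers values)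

-- ===== LEMMAS AND PROOFS =====

-- a list whose elements satisfy p exactly before position k has countP p = k
theorem countP_split (p : Int → Bool) :
    ∀ (xs : List Int) (k : Nat), k ≤ xs.length →
    (∀ j (hj : j < xs.length), j < k → p xs[j]) →
    (∀ j (hj : j < xs.length), k ≤ j → ¬ p xs[j]) →
    xs.countP p = k := by
  intro xs
  induction xs with
  | nil => intro k hk _ _; simp at hk ⊢; omega
  | cons a t ih =>
    intro k hk h1 h2
    cases k with
    | zero =>
      simp only [List.countP_cons]
      have h0 : ¬ p a := by simpa using h2 0 (by simp) (by omega)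
      have ht : t.countP p = 0 := by
        apply ih 0 (by omega) (by omega)
        intro j hj _
        simpa using h2 (j + 1) (by simpa using hj) (by omega)
      simp [ht, h0]
    | succ k' =>
      have ha : p a := by simpa using h1 0 (by simp) (by omega)
      have ht : t.countP p = k' := by
        apply ih k' (by simpa using hk)
        · intro j hj hjk
          simpa using h1 (j + 1) (by simpa using hj) (by omega)
        · intro j hj hjk
          simpa using h2 (j + 1) (by simpa using hj) (by omega)
      simp [ha, ht]

theorem pairwise_le_getElem (a : List Int) (hs : a.Pairwise (fun u v => u ≤ v))
    (i j : Nat) (hi : i < a.length) (hj : j < a.length) (hij : i ≤ j) : a[i] ≤ a[j] := by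
  rcases Nat.lt_or_ge i j with h | h
  · exact List.pairwise_iff_getElem.mp hs i j hi hj h
  · have : i = j := by omega
    subst this; exact le_refl _

-- invariant of the left binary-search loop: it returns the split point of (· < x)
theorem bisectLeftLoop_split (a : List Int) (x : Int)
    (hs : a.Pairwise (fun u v => u ≤ v)) :
    ∀ (d lo hi : Nat), hi - lo ≤ d → lo ≤ hi → hi ≤ a.length →
    (∀ j (hj : j < a.length), j < lo → a[j] < x) →
    (∀ j (hj : j < a.length), hi ≤ j → x ≤ a[j]) →
    bisectLeftLoop a x lo hi ≤ a.length ∧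
    (∀ j (hj : j < a.length), j < bisectLeftLoop a x lo hi → a[j] < x) ∧
    (∀ j (hj : j < a.length), bisectLeftLoop a x lo hi ≤ j → x ≤ a[j]) := by
  intro d
  induction d with
  | zero =>
    intro lo hi hd hlh hhl h1 h2
    have : lo = hi := by omega
    subst this
    rw [bisectLeftLoop.eq_def]
    simp only [lt_irrefl, dite_false]
    exact ⟨by omega, h1, h2⟩
  | succ d' ih =>
    intro lo hi hd hlh hhl h1 h2
    rw [bisectLeftLoop.eq_def]
    by_cases h : lo < hi
    · simp only [h, dite_true]
      have hmid : (lo + hi) / 2 < a.length := by omega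
      have hget : PySem.List.pyGetD a (((lo + hi) / 2 : Nat) : Int) 0 = a[(lo + hi) / 2] := by
        rw [PySem.List.pyGetD_natCast, List.getD_eq_getElem a 0 hmid]
      rw [hget]
      by_cases hc : a[(lo + hi) / 2] < x
      · simp only [hc, if_true]
        apply ih ((lo + hi) / 2 + 1) hi (by omega) (by omega) hhl
        · intro j hj hjk
          calc a[j] ≤ a[(lo + hi) / 2] := pairwise_le_getElem a hs j _ hj hmid (by omega)
          _ < x := hc
        · exact h2
      · simp only [hc, if_false]
        apply ih lo ((lo + hi) / 2) (by omega) (by omega) (by omega) h1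
        intro j hj hjk
        calc x ≤ a[(lo + hi) / 2] := by omega
        _ ≤ a[j] := pairwise_le_getElem a hs _ j hmid hj hjk
    · simp only [h, dite_false]
      have : lo = hi := by omega
      subst this
      exact ⟨by omega, h1, h2⟩

-- invariant of the right binary-search loop: it returns the split point of (· ≤ x)
theorem bisectRightLoop_split (a : List Int) (x : Int)
    (hs : a.Pairwise (fun u v => u ≤ v)) :
    ∀ (d lo hi : Nat), hi - lo ≤ d → lo ≤ hi → hi ≤ a.length →
    (∀ j (hj : j < a.length), j < lo → a[j] ≤ x) →
    (∀ j (hj : j < a.length), hi ≤ j → x < a[j]) →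
    bisectRightLoop a x lo hi ≤ a.length ∧
    (∀ j (hj : j < a.length), j < bisectRightLoop a x lo hi → a[j] ≤ x) ∧
    (∀ j (hj : j < a.length), bisectRightLoop a x lo hi ≤ j → x < a[j]) := by
  intro d
  induction d with
  | zero =>
    intro lo hi hd hlh hhl h1 h2
    have : lo = hi := by omega
    subst this
    rw [bisectRightLoop.eq_def]
    simp only [lt_irrefl, dite_false]
    exact ⟨by omega, h1, h2⟩
  | succ d' ih =>
    intro lo hi hd hlh hhl h1 h2
    rw [bisectRightLoop.eq_def]
    by_cases h : lo < hi
    · simp only [h, dite_true]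
      have hmid : (lo + hi) / 2 < a.length := by omega
      have hget : PySem.List.pyGetD a (((lo + hi) / 2 : Nat) : Int) 0 = a[(lo + hi) / 2] := by
        rw [PySem.List.pyGetD_natCast, List.getD_eq_getElem a 0 hmid]
      rw [hget]
      by_cases hc : x < a[(lo + hi) / 2]
      · simp only [hc, if_true]
        apply ih lo ((lo + hi) / 2) (by omega) (by omega) (by omega) h1
        intro j hj hjk
        calc x < a[(lo + hi) / 2] := hc
        _ ≤ a[j] := pairwise_le_getElem a hs _ j hmid hj hjk
      · simp only [hc, if_false]
        apply ih ((lo + hi) / 2 + 1) hi (by omega) (by omega) hhl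
        · intro j hj hjk
          calc a[j] ≤ a[(lo + hi) / 2] := pairwise_le_getElem a hs j _ hj hmid (by omega)
          _ ≤ x := by omega
        · exact h2
    · simp only [h, dite_false]
      have : lo = hi := by omega
      subst this
      exact ⟨by omega, h1, h2⟩

theorem bisectLeftLoop_eq_countP (a : List Int) (x : Int)
    (hs : a.Pairwise (fun u v => u ≤ v)) :
    bisectLeftLoop a x 0 a.length = a.countP (fun y => decide (y < x)) := by
  obtain ⟨hle, hlt, hge⟩ :=
    bisectLeftLoop_split a x hs a.length 0 a.length (by omega) (by omega) (le_refl _)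
      (by omega) (by omega)
  symm
  apply countP_split _ a _ hle
  · intro j hj hjk; simpa using hlt j hj hjk
  · intro j hj hjk; simpa using hge j hj hjk

theorem bisectRightLoop_eq_countP (a : List Int) (x : Int)
    (hs : a.Pairwise (fun u v => u ≤ v)) :
    bisectRightLoop a x 0 a.length = a.countP (fun y => decide (y ≤ x)) := by
  obtain ⟨hle, hlt, hge⟩ :=
    bisectRightLoop_split a x hs a.length 0 a.length (by omega) (by omega) (le_refl _)
      (by omega) (by omega)
  symm
  apply countP_split _ a _ hle
  · intro j hj hjk; simpa using hlt j hj hjk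
  · intro j hj hjk; simpa [not_le] using hge j hj hjk

theorem countP_between (lo hi : Int) (h : lo ≤ hi) (l : List Int) :
    l.countP (fun y => decide (y ≤ hi)) =
    l.countP (fun y => decide (y < lo)) + l.countP (fun y => decide (lo ≤ y ∧ y ≤ hi)) := by
  induction l with
  | nil => simp
  | cons a t ih =>
    simp only [List.countP_cons]
    rw [ih]
    rcases lt_or_ge a lo with h1 | h1
    · have d1 : decide (a ≤ hi) = true := by simp; omega
      have d2 : decide (a < lo) = true := by simp [h1]
      have d3 : decide (lo ≤ a ∧ a ≤ hi) = false := by simp; omega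
      rw [d1, d2, d3]; simp; omega
    · have d2 : decide (a < lo) = false := by simp; omega
      by_cases h2 : a ≤ hi
      · have d1 : decide (a ≤ hi) = true := by simp [h2]
        have d3 : decide (lo ≤ a ∧ a ≤ hi) = true := by simp; omega
        rw [d1, d2, d3]; simp; omega
      · have d1 : decide (a ≤ hi) = false := by simp [h2]
        have d3 : decide (lo ≤ a ∧ a ≤ hi) = false := by simp; omega
        rw [d1, d2, d3]; simp

-- ===== VERDICT =====
theorem analyze_numbers_spec : Claim_equal_analyze_numbers := by
  unfold Claim_equal_analyze_numbers
  intro values _hdom hpre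
  unfold Spec_analyze_numbers analyze_numbers analyze_numbers_alt
  simp only []
  set vs := PySem.List.sorted values (fun x => x) with hvs
  have hs : vs.Pairwise (fun u v => u ≤ v) := PySem.List.sorted_pairwise values (fun x => x)
  have hlen : 0 < vs.length := by
    rw [hvs, PySem.List.length_sorted]
    exact List.length_pos_iff.mpr hpre
  -- the two median indices, as Nats
  have hfd1 : PySem.Int.floordiv ((vs.length : Int) - 1) 2 = (((vs.length - 1) / 2 : Nat) : Int) := by
    have h1 : ((vs.length : Int) - 1) = ((vs.length - 1 : Nat) : Int) := by omega
    rw [h1]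
    exact_mod_cast PySem.Int.floordiv_natCast (vs.length - 1) 2
  have hfd2 : PySem.Int.floordiv (vs.length : Int) 2 = ((vs.length / 2 : Nat) : Int) := by
    exact_mod_cast PySem.Int.floordiv_natCast vs.length 2
  have hi1 : (vs.length - 1) / 2 < vs.length := by omega
  have hi2 : vs.length / 2 < vs.length := by omega
  have hlow : PySem.List.pyGetD vs (PySem.Int.floordiv ((vs.length : Int) - 1) 2) 0 = vs[(vs.length - 1) / 2] := by
    rw [hfd1, PySem.List.pyGetD_natCast, List.getD_eq_getElem vs 0 hi1]
  have hhigh : PySem.List.pyGetD vs (PySem.Int.floordiv (vs.length : Int) 2) 0 = vs[vs.length / 2] := by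
    rw [hfd2, PySem.List.pyGetD_natCast, List.getD_eq_getElem vs 0 hi2]
  rw [hlow, hhigh]
  set low := vs[(vs.length - 1) / 2] with hlowdef
  set high := vs[vs.length / 2] with hhighdef
  have hlh : low ≤ high := pairwise_le_getElem vs hs _ _ hi1 hi2 (by omega)
  -- only the middle components (the counts) differ between the two sides
  refine Prod.ext rfl (Prod.ext ?_ rfl)
  show vs.foldl (fun acc x => if low ≤ x ∧ x ≤ high then acc + 1 else acc) (0 : Int)
      = (bisectRightLoop vs high 0 vs.length : Int) - (bisectLeftLoop vs low 0 vs.length : Int)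
  have hfold : vs.foldl (fun acc x => if low ≤ x ∧ x ≤ high then acc + 1 else acc) (0 : Int)
      = ((vs.countP (fun y => decide (low ≤ y ∧ y ≤ high)) : Nat) : Int) := by
    have := PySem.List.foldl_count_if (fun y => decide (low ≤ y ∧ y ≤ high)) vs (0 : Int)
    simpa using this
  rw [hfold, bisectRightLoop_eq_countP vs high hs, bisectLeftLoop_eq_countP vs low hs,
    countP_between low high hlh vs]
  push_cast
  ring
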